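-- pv_equiv track=rewrite | github.com/ungquanghuy-kddi/CartoMapQA | Parse/parse_old_models/parse_response_mtmf.py | parse_gemini
-- ===== SOURCE A (Python) =====
-- POI_ALTER_NAME = {
--     "0": ["convenience store", "convenience store"],
--     "1": ["supermarket"],
--     "2": ["drug store/pharmacy", "drug_store/pharmacy"],
--     "3": ["general clinic", "general_clinic"],
--     "4": ["hospital"],
--     "5": ["restaurant"],
--     "6": ["fast food store", "fast_food_store"],
--     "7": ["coffee shop", "coffee_shop"],
--     "8": ["atm or cash point", "atm_or_cash_point"],
--     "9": ["bank"],
--     "10": ["playground"],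
--     "11": ["area of park", "area_of_park"],
--     "12": ["fitness center", "fitness_center"],
--     "13": ["clothes shop", "clothes_shop"],
--     "14": ["beauty shop", "beauty_shop"],
--     "15": ["water stream", "water_stream"],
--     "16": ["river"],
--     "17": ["bus stop", "bus_stop"],
--     "18": ["gas station", "gas_station"],
--     "19": ["primary road", "primary_road"],
--     "20": ["car parking place", "car_parking_place"],
--     "21": ["public toilet", "public_toilet"],
-- }
--
-- POI_LIST = {
--     "0": "convenience store",
--     "1": "supermarket",
--     "2": "drug store/pharmacy",
--     "3": "clinic",
--     "4": "hospital",
--     "5": "restaurant",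
--     "6": "fast food store",
--     "7": "coffee shop",
--     "8": "ATM or cash point",
--     "9": "bank",
--     "10": "playground",
--     "11": "park",
--     "12": "fitness center",
--     "13": "clothes shop",
--     "14": "beauty shop",
--     "15": "water stream",
--     "16": "river",
--     "17": "bus stop",
--     "18": "gas station",
--     "19": "primary road",
--     "20": "car parking place",
--     "21": "public toilet"
-- }
--
-- def parse_gemini(response):
--     norm_response = {}
--     for item in response:
--         # check in the list
--         lc_item = item.lower()
--         for k, cands in POI_ALTER_NAME.items():
--             if lc_item in cands:
--                 norm_response[POI_LIST[k]] = response[item]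
--     return norm_response
-- ===== SOURCE B (Python) =====
-- ALT_TO_POI = {'convenience store': 'convenience store', 'supermarket': 'supermarket', 'drug store/pharmacy': 'drug store/pharmacy', 'drug_store/pharmacy': 'drug store/pharmacy', 'general clinic': 'clinic', 'general_clinic': 'clinic', 'hospital': 'hospital', 'restaurant': 'restaurant', 'fast food store': 'fast food store', 'fast_food_store': 'fast food store', 'coffee shop': 'coffee shop', 'coffee_shop': 'coffee shop', 'atm or cash point': 'ATM or cash point', 'atm_or_cash_point': 'ATM or cash point', 'bank': 'bank', 'playground': 'playground', 'area of park': 'park', 'area_of_park': 'park', 'fitness center': 'fitness center', 'fitness_center': 'fitness center', 'clothes shop': 'clothes shop', 'clothes_shop': 'clothes shop', 'beauty shop': 'beauty shop', 'beauty_shop': 'beauty shop', 'water stream': 'water stream', 'water_stream': 'water stream', 'river': 'river', 'bus stop': 'bus stop', 'bus_stop': 'bus stop', 'gas station': 'gas station', 'gas_station': 'gas station', 'primary road': 'primary road', 'primary_road': 'primary road', 'car parking place': 'car parking place', 'car_parking_place': 'car parking place', 'public toilet': 'public toilet', 'public_toilet': 'public toilet'}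
--
-- def parse_gemini(response):
--     norm_response = {}
--     for item in response:
--         poi = ALT_TO_POI.get(item.lower())
--         if poi is not None:
--             norm_response[poi] = response[item]
--     return norm_response
-- ===== Notes on version B (the rewrite author's own statement) =====
-- stated objective: simpler
-- what changed: B precomputes a reverse alternate-name -> display-name dict once and replaces A's inner 22-entry membership scan per item with a single dict lookup, making the parse a flat single pass.
import Mathlib
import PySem

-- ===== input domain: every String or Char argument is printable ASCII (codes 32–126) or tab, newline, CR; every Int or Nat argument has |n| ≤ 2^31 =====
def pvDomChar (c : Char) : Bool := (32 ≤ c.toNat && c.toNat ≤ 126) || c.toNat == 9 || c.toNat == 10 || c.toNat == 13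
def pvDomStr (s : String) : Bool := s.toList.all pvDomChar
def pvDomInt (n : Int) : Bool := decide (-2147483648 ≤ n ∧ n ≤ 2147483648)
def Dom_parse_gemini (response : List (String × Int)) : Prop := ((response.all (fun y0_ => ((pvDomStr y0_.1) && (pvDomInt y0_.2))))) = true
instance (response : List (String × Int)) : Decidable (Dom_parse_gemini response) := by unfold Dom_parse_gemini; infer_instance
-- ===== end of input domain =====

-- B replaces A's inner scan over the 22 POI_ALTER_NAME entries by a single lookup in a prebuilt
-- alternate-name → display-name dict (objective: simpler single-pass traversal; same observable result).

-- ===== PORT A =====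
def poiAlterName : List (String × List String) := [("0", ["convenience store", "convenience store"]), ("1", ["supermarket"]), ("2", ["drug store/pharmacy", "drug_store/pharmacy"]), ("3", ["general clinic", "general_clinic"]), ("4", ["hospital"]), ("5", ["restaurant"]), ("6", ["fast food store", "fast_food_store"]), ("7", ["coffee shop", "coffee_shop"]), ("8", ["atm or cash point", "atm_or_cash_point"]), ("9", ["bank"]), ("10", ["playground"]), ("11", ["area of park", "area_of_park"]), ("12", ["fitness center", "fitness_center"]), ("13", ["clothes shop", "clothes_shop"]), ("14", ["beauty shop", "beauty_shop"]), ("15", ["water stream", "water_stream"]), ("16", ["river"]), ("17", ["bus stop", "bus_stop"]), ("18", ["gas station", "gas_station"]), ("19", ["primary road", "primary_road"]), ("20", ["car parking place", "car_parking_place"]), ("21", ["public toilet", "public_toilet"])]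

def poiList : PySem.Dict String String := PySem.Dict.mk [("0", "convenience store"), ("1", "supermarket"), ("2", "drug store/pharmacy"), ("3", "clinic"), ("4", "hospital"), ("5", "restaurant"), ("6", "fast food store"), ("7", "coffee shop"), ("8", "ATM or cash point"), ("9", "bank"), ("10", "playground"), ("11", "park"), ("12", "fitness center"), ("13", "clothes shop"), ("14", "beauty shop"), ("15", "water stream"), ("16", "river"), ("17", "bus stop"), ("18", "gas station"), ("19", "primary road"), ("20", "car parking place"), ("21", "public toilet")]

def parse_gemini (response : List (String × Int)) : List (String × Int) :=
  ((PySem.Dict.ofList response).items.foldl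
    (fun norm p =>
      let lc := PySem.Str.lower p.1
      -- inner 'for k, cands in POI_ALTER_NAME.items()' loop; POI_LIST[k] always succeeds, getD "" is the total form
      poiAlterName.foldl
        (fun norm kc => if lc ∈ kc.2 then norm.insert (poiList.getD kc.1 "") p.2 else norm)
        norm)
    (PySem.Dict.empty : PySem.Dict String Int)).items

-- ===== PORT B =====
def altToPoi : PySem.Dict String String := PySem.Dict.mk [
  ("convenience store", "convenience store"),
  ("supermarket", "supermarket"),
  ("drug store/pharmacy", "drug store/pharmacy"),
  ("drug_store/pharmacy", "drug store/pharmacy"),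
  ("general clinic", "clinic"),
  ("general_clinic", "clinic"),
  ("hospital", "hospital"),
  ("restaurant", "restaurant"),
  ("fast food store", "fast food store"),
  ("fast_food_store", "fast food store"),
  ("coffee shop", "coffee shop"),
  ("coffee_shop", "coffee shop"),
  ("atm or cash point", "ATM or cash point"),
  ("atm_or_cash_point", "ATM or cash point"),
  ("bank", "bank"),
  ("playground", "playground"),
  ("area of park", "park"),
  ("area_of_park", "park"),
  ("fitness center", "fitness center"),
  ("fitness_center", "fitness center"),
  ("clothes shop", "clothes shop"),
  ("clothes_shop", "clothes shop"),
  ("beauty shop", "beauty shop"),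
  ("beauty_shop", "beauty shop"),
  ("water stream", "water stream"),
  ("water_stream", "water stream"),
  ("river", "river"),
  ("bus stop", "bus stop"),
  ("bus_stop", "bus stop"),
  ("gas station", "gas station"),
  ("gas_station", "gas station"),
  ("primary road", "primary road"),
  ("primary_road", "primary road"),
  ("car parking place", "car parking place"),
  ("car_parking_place", "car parking place"),
  ("public toilet", "public toilet"),
  ("public_toilet", "public toilet")]

def parse_gemini_alt (response : List (String × Int)) : List (String × Int) :=
  ((PySem.Dict.ofList response).items.foldl
    (fun norm p =>
      match altToPoi.get? (PySem.Str.lower p.1) with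
      | some nm => norm.insert nm p.2
      | none => norm)
    (PySem.Dict.empty : PySem.Dict String Int)).items

-- ===== PRECONDITION & SPEC =====
def Spec_parse_gemini (response : List (String × Int)) (out : List (String × Int)) : Prop := out = parse_gemini_alt response
instance (response : List (String × Int)) (out : List (String × Int)) : Decidable (Spec_parse_gemini response out) := by unfold Spec_parse_gemini; infer_instance

-- ===== CLAIM (what is proved, stated in full; the proofs are below) =====
def Claim_equal_parse_gemini : Prop := ∀ (response : List (String × Int)), Dom_parse_gemini response → Spec_parse_gemini response (parse_gemini response)

-- ===== LEMMAS AND PROOFS =====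

-- A's inner scan over poiAlterName equals one lookup in the prebuilt reverse dict.
theorem inner_eq (lc : String) (norm : PySem.Dict String Int) (v : Int) :
    poiAlterName.foldl (fun norm kc => if lc ∈ kc.2 then norm.insert (poiList.getD kc.1 "") v else norm) norm
    = (match altToPoi.get? lc with | some nm => norm.insert nm v | none => norm) := by
  by_cases h0 : "convenience store" = lc
  · subst h0; rfl
  by_cases h1 : "supermarket" = lc
  · subst h1; rfl
  by_cases h2 : "drug store/pharmacy" = lc
  · subst h2; rfl
  by_cases h3 : "drug_store/pharmacy" = lc
  · subst h3; rfl
  by_cases h4 : "general clinic" = lc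
  · subst h4; rfl
  by_cases h5 : "general_clinic" = lc
  · subst h5; rfl
  by_cases h6 : "hospital" = lc
  · subst h6; rfl
  by_cases h7 : "restaurant" = lc
  · subst h7; rfl
  by_cases h8 : "fast food store" = lc
  · subst h8; rfl
  by_cases h9 : "fast_food_store" = lc
  · subst h9; rfl
  by_cases h10 : "coffee shop" = lc
  · subst h10; rfl
  by_cases h11 : "coffee_shop" = lc
  · subst h11; rfl
  by_cases h12 : "atm or cash point" = lc
  · subst h12; rfl
  by_cases h13 : "atm_or_cash_point" = lc
  · subst h13; rfl
  by_cases h14 : "bank" = lc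
  · subst h14; rfl
  by_cases h15 : "playground" = lc
  · subst h15; rfl
  by_cases h16 : "area of park" = lc
  · subst h16; rfl
  by_cases h17 : "area_of_park" = lc
  · subst h17; rfl
  by_cases h18 : "fitness center" = lc
  · subst h18; rfl
  by_cases h19 : "fitness_center" = lc
  · subst h19; rfl
  by_cases h20 : "clothes shop" = lc
  · subst h20; rfl
  by_cases h21 : "clothes_shop" = lc
  · subst h21; rfl
  by_cases h22 : "beauty shop" = lc
  · subst h22; rfl
  by_cases h23 : "beauty_shop" = lc
  · subst h23; rfl
  by_cases h24 : "water stream" = lc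
  · subst h24; rfl
  by_cases h25 : "water_stream" = lc
  · subst h25; rfl
  by_cases h26 : "river" = lc
  · subst h26; rfl
  by_cases h27 : "bus stop" = lc
  · subst h27; rfl
  by_cases h28 : "bus_stop" = lc
  · subst h28; rfl
  by_cases h29 : "gas station" = lc
  · subst h29; rfl
  by_cases h30 : "gas_station" = lc
  · subst h30; rfl
  by_cases h31 : "primary road" = lc
  · subst h31; rfl
  by_cases h32 : "primary_road" = lc
  · subst h32; rfl
  by_cases h33 : "car parking place" = lc
  · subst h33; rfl
  by_cases h34 : "car_parking_place" = lc
  · subst h34; rfl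
  by_cases h35 : "public toilet" = lc
  · subst h35; rfl
  by_cases h36 : "public_toilet" = lc
  · subst h36; rfl
  have h0' := Ne.symm h0
  have h1' := Ne.symm h1
  have h2' := Ne.symm h2
  have h3' := Ne.symm h3
  have h4' := Ne.symm h4
  have h5' := Ne.symm h5
  have h6' := Ne.symm h6
  have h7' := Ne.symm h7
  have h8' := Ne.symm h8
  have h9' := Ne.symm h9
  have h10' := Ne.symm h10
  have h11' := Ne.symm h11
  have h12' := Ne.symm h12
  have h13' := Ne.symm h13
  have h14' := Ne.symm h14
  have h15' := Ne.symm h15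
  have h16' := Ne.symm h16
  have h17' := Ne.symm h17
  have h18' := Ne.symm h18
  have h19' := Ne.symm h19
  have h20' := Ne.symm h20
  have h21' := Ne.symm h21
  have h22' := Ne.symm h22
  have h23' := Ne.symm h23
  have h24' := Ne.symm h24
  have h25' := Ne.symm h25
  have h26' := Ne.symm h26
  have h27' := Ne.symm h27
  have h28' := Ne.symm h28
  have h29' := Ne.symm h29
  have h30' := Ne.symm h30
  have h31' := Ne.symm h31
  have h32' := Ne.symm h32
  have h33' := Ne.symm h33
  have h34' := Ne.symm h34
  have h35' := Ne.symm h35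
  have h36' := Ne.symm h36
  simp [poiAlterName, altToPoi, PySem.Dict.get?, h0, h0', h1, h1', h2, h2', h3, h3', h4, h4', h5, h5', h6, h6', h7, h7', h8, h8', h9, h9', h10, h10', h11, h11', h12, h12', h13, h13', h14, h14', h15, h15', h16, h16', h17, h17', h18, h18', h19, h19', h20, h20', h21, h21', h22, h22', h23, h23', h24, h24', h25, h25', h26, h26', h27, h27', h28, h28', h29, h29', h30, h30', h31, h31', h32, h32', h33, h33', h34, h34', h35, h35', h36, h36']


-- ===== VERDICT (by name: the statement is the Claim_ definition above) =====
theorem parse_gemini_spec : Claim_equal_parse_gemini := by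
  intro response _
  unfold Spec_parse_gemini parse_gemini parse_gemini_alt
  have hstep : (fun (norm : PySem.Dict String Int) (p : String × Int) =>
      let lc := PySem.Str.lower p.1
      poiAlterName.foldl
        (fun norm kc => if lc ∈ kc.2 then norm.insert (poiList.getD kc.1 "") p.2 else norm)
        norm)
    = (fun (norm : PySem.Dict String Int) (p : String × Int) =>
      match altToPoi.get? (PySem.Str.lower p.1) with
      | some nm => norm.insert nm p.2
      | none => norm) := by
    funext norm p
    exact inner_eq (PySem.Str.lower p.1) norm p.2
  rw [hstep]
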